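-- pv_equiv track=rewrite | github.com/OxQuasar/nous-memories | iching/eastwest/cyclotomic_probe.py | is_invertible_f2
-- ===== SOURCE A (Python) =====
-- def is_invertible_f2(rows, n):
--     R = list(rows)
--     for col in range(n):
--         mask = 1 << (n - 1 - col)
--         pivot = None
--         for r in range(col, n):
--             if R[r] & mask:
--                 pivot = r; break
--         if pivot is None:
--             return False
--         R[col], R[pivot] = R[pivot], R[col]
--         for r in range(n):
--             if r != col and R[r] & mask:
--                 R[r] ^= R[col]
--     return True
-- ===== SOURCE B (Python) =====
-- def is_invertible_f2(rows, n):
--     # Online XOR-basis independence test: reduce each row against a basis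
--     # keyed by leading-bit position; a row that reduces to 0 is dependent.
--     basis = {}
--     for i in range(n):
--         row = rows[i] & ((1 << n) - 1)
--         for p in range(n - 1, -1, -1):
--             if p in basis and (row >> p) & 1:
--                 row ^= basis[p]
--         if row == 0:
--             return False
--         basis[row.bit_length() - 1] = row
--     return True
-- ===== Notes on version B (the rewrite author's own statement) =====
-- stated objective: alternative
-- what changed: Replaces column-major Gaussian elimination (pivot search, row swap, full elimination pass per column, mutated matrix) with an online XOR linear basis: each row is masked to n bits, greedily reduced against basis vectors keyed by leading-bit position, and rejected as dependent if it reduces to zero.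
import Mathlib
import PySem

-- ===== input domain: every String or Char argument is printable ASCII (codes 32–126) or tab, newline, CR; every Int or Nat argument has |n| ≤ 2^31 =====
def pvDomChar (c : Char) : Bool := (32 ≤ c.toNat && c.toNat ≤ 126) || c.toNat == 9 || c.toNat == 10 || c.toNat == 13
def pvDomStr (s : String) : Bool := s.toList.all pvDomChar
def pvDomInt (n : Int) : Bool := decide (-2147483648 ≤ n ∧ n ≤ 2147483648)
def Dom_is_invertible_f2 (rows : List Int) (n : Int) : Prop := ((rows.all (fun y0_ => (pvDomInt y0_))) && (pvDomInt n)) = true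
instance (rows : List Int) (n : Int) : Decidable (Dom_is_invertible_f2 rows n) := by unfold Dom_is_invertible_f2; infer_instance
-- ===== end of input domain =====

-- B replaces A's column-major Gaussian elimination (pivot search + row swap + full
-- elimination pass per column) by an online XOR linear basis keyed by leading-bit
-- position; objective: alternative (same asymptotic cost, no swaps/in-place matrix).

-- ===== PORT A =====
-- Literal transliteration of A: for col in range(n): find pivot, swap, eliminate.
-- (1 <<< (n-1-col).toNat): the shift amount n-1-col is ≥ 0 for every col produced
-- by range(n), so .toNat is exact here.
def pvAGo (n : Int) (R : List Int) : List Int → Bool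
  | [] => true
  | col :: rest =>
    let mask : Int := 1 <<< (n - 1 - col).toNat
    match (PySem.List.pyRange col n 1).find?
        (fun r => PySem.Int.band (PySem.List.pyGetD R r 0) mask != 0) with
    | none => false
    | some p =>
      let R1 := PySem.List.pySetD (PySem.List.pySetD R col (PySem.List.pyGetD R p 0)) p
                  (PySem.List.pyGetD R col 0)
      let R2 := (PySem.List.pyRange 0 n 1).foldl
          (fun S r =>
            if r != col && (PySem.Int.band (PySem.List.pyGetD S r 0) mask != 0) then
              PySem.List.pySetD S r
                (PySem.Int.bxor (PySem.List.pyGetD S r 0) (PySem.List.pyGetD S col 0))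
            else S) R1
      pvAGo n R2 rest

def is_invertible_f2 (rows : List Int) (n : Int) : Bool :=
  pvAGo n rows (PySem.List.pyRange 0 n 1)

-- ===== PORT B =====
-- Literal transliteration of B (Source B): online XOR basis, dict keyed by leading bit.
def pvBGo (rows : List Int) (n : Int) (basis : PySem.Dict Int Int) : List Int → Bool
  | [] => true
  | i :: rest =>
    let row0 := PySem.Int.band (PySem.List.pyGetD rows i 0) ((1 <<< n.toNat) - 1)
    let row := (PySem.List.pyRange (n - 1) (-1) (-1)).foldl
        (fun (row : Int) p =>
          if basis.contains p && (PySem.Int.band (row >>> p.toNat) 1 != 0) then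
            PySem.Int.bxor row (basis.getD p 0)
          else row) row0
    if row == 0 then false
    else pvBGo rows n (basis.insert ((PySem.Int.bitLength row : Int) - 1) row) rest

def is_invertible_f2_alt (rows : List Int) (n : Int) : Bool :=
  pvBGo rows n PySem.Dict.empty (PySem.List.pyRange 0 n 1)

-- ===== PRECONDITION & SPEC =====
-- Pre_ excludes exactly the inputs where A raises IndexError: n > len(rows)
-- (with n > 0 A always reads an index up to n-1 before it can return).
def Pre_is_invertible_f2 (rows : List Int) (n : Int) : Prop := n ≤ (rows.length : Int)
instance (rows : List Int) (n : Int) : Decidable (Pre_is_invertible_f2 rows n) := by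
  unfold Pre_is_invertible_f2; infer_instance
def pvWitness_is_invertible_f2 : List Int × Int := ([2, 1], 2)

def Spec_is_invertible_f2 (rows : List Int) (n : Int) (out : Bool) : Prop :=
  out = is_invertible_f2_alt rows n
instance (rows : List Int) (n : Int) (out : Bool) : Decidable (Spec_is_invertible_f2 rows n out) := by
  unfold Spec_is_invertible_f2; infer_instance

-- ===== CLAIM (what is proved, stated in full; the proofs are below) =====
def Claim_equal_is_invertible_f2 : Prop := ∀ (rows : List Int) (n : Int),
  Dom_is_invertible_f2 rows n → Pre_is_invertible_f2 rows n →
  Spec_is_invertible_f2 rows n (is_invertible_f2 rows n)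

-- ===== LEMMAS AND PROOFS =====
-- ===== generic XOR-span theory over Nat =====
def pvSel : List Nat → List Bool → Nat
  | _, [] => 0
  | [], _ :: _ => 0
  | v :: vs, c :: cs => (if c then v else 0) ^^^ pvSel vs cs

def pvMem (x : Nat) (L : List Nat) : Prop :=
  ∃ cs : List Bool, cs.length = L.length ∧ pvSel L cs = x

theorem pvSel_nil (cs : List Bool) : pvSel [] cs = 0 := by cases cs <;> rfl

theorem pvSel_replicate_false (L : List Nat) :
    pvSel L (List.replicate L.length false) = 0 := by
  induction L with
  | nil => rfl
  | cons v vs ih => simpa [pvSel, List.replicate] using ih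

theorem pvMem_zero (L : List Nat) : pvMem 0 L :=
  ⟨List.replicate L.length false, by simp, pvSel_replicate_false L⟩

theorem pvMem_cons_iff {x : Nat} {v : Nat} {vs : List Nat} :
    pvMem x (v :: vs) ↔ ∃ (c : Bool) (y : Nat), pvMem y vs ∧ x = (if c then v else 0) ^^^ y := by
  constructor
  · rintro ⟨cs, hlen, hsel⟩
    cases cs with
    | nil => simp at hlen
    | cons c cs' =>
      exact ⟨c, pvSel vs cs', ⟨cs', by simpa using hlen, rfl⟩, hsel.symm⟩
  · rintro ⟨c, y, ⟨cs, hlen, hsel⟩, rfl⟩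
    exact ⟨c :: cs, by simpa using hlen, by simp [pvSel, hsel]⟩

theorem pvMem_cons_of {x v : Nat} {vs : List Nat} (h : pvMem x vs) : pvMem x (v :: vs) :=
  pvMem_cons_iff.mpr ⟨false, x, h, by simp⟩

theorem pvMem_head (v : Nat) (vs : List Nat) : pvMem v (v :: vs) :=
  pvMem_cons_iff.mpr ⟨true, 0, pvMem_zero vs, by simp⟩

theorem pvMem_xor {x y : Nat} {L : List Nat} (hx : pvMem x L) (hy : pvMem y L) :
    pvMem (x ^^^ y) L := by
  induction L generalizing x y with
  | nil =>
    obtain ⟨_, _, hx⟩ := hx; obtain ⟨_, _, hy⟩ := hy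
    simp [pvSel_nil] at hx hy; subst hx; subst hy; exact pvMem_zero []
  | cons v vs ih =>
    obtain ⟨c1, x', hx', rfl⟩ := pvMem_cons_iff.mp hx
    obtain ⟨c2, y', hy', rfl⟩ := pvMem_cons_iff.mp hy
    refine pvMem_cons_iff.mpr ⟨xor c1 c2, x' ^^^ y', ih hx' hy', ?_⟩
    cases c1 <;> cases c2 <;> simp [Nat.xor_comm, Nat.xor_assoc, Nat.xor_left_comm]

theorem pvMem_elem {v : Nat} {L : List Nat} (h : v ∈ L) : pvMem v L := by
  induction L with
  | nil => simp at h
  | cons w ws ih =>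
    rcases List.mem_cons.mp h with rfl | h
    · exact pvMem_head _ _
    · exact pvMem_cons_of (ih h)

theorem pvMem_mono {L L' : List Nat} (hgen : ∀ v ∈ L, pvMem v L') :
    ∀ {x : Nat}, pvMem x L → pvMem x L' := by
  intro x hx
  induction L generalizing x with
  | nil =>
    obtain ⟨_, _, hsel⟩ := hx; rw [pvSel_nil] at hsel; subst hsel; exact pvMem_zero _
  | cons v vs ih =>
    obtain ⟨c, y, hy, rfl⟩ := pvMem_cons_iff.mp hx
    have h1 : pvMem (if c then v else 0) L' := by
      cases c
      · simpa using pvMem_zero L'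
      · simpa using hgen v (by simp)
    exact pvMem_xor h1 (ih (fun w hw => hgen w (by simp [hw])) hy)

theorem pvMem_append_left {x : Nat} {L L' : List Nat} (h : pvMem x L) : pvMem x (L ++ L') :=
  pvMem_mono (fun v hv => pvMem_elem (by simp [hv])) h

theorem pvSel_lt {N : Nat} {L : List Nat} (hL : ∀ v ∈ L, v < 2 ^ N) (cs : List Bool) :
    pvSel L cs < 2 ^ N := by
  induction L generalizing cs with
  | nil => simpa [pvSel_nil] using Nat.pos_pow_of_pos N (by norm_num)
  | cons v vs ih =>
    cases cs with
    | nil => simpa [pvSel] using Nat.pos_pow_of_pos N (by norm_num)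
    | cons c cs' =>
      have h1 : (if c then v else 0) < 2 ^ N := by
        cases c
        · simpa using Nat.pos_pow_of_pos N (by norm_num)
        · simpa using hL v (by simp)
      exact Nat.xor_lt_two_pow h1 (ih (fun w hw => hL w (by simp [hw])) cs')

-- selected-generators-lack-a-bit ⇒ the combination lacks it
theorem pvSel_bit_none {L : List Nat} {cs : List Bool} {k : Nat}
    (h : ∀ i, i < L.length → cs.getD i false = true → (L.getD i 0).testBit k = false) :
    (pvSel L cs).testBit k = false := by
  induction L generalizing cs with
  | nil => simp [pvSel_nil]
  | cons v vs ih =>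
    cases cs with
    | nil => simp [pvSel]
    | cons c cs' =>
      have h0 := h 0 (by simp)
      have hr : (pvSel vs cs').testBit k = false :=
        ih (fun i hi hc => h (i + 1) (by simpa using hi) (by simpa using hc))
      have hv : ((if c then v else 0) : Nat).testBit k = false := by
        cases c
        · simp
        · simpa using h0 (by simp)
      simp [pvSel, Nat.testBit_xor, hv, hr]

-- exactly one generator carries bit k ⇒ the combination's bit k is its coefficient
theorem pvSel_bit_unique {L : List Nat} {cs : List Bool} {k j : Nat}
    (hj : j < L.length) (hbit : (L.getD j 0).testBit k = true)
    (hothers : ∀ i, i < L.length → i ≠ j → (L.getD i 0).testBit k = false) :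
    (pvSel L cs).testBit k = cs.getD j false := by
  induction L generalizing cs j with
  | nil => simp at hj
  | cons v vs ih =>
    cases cs with
    | nil =>
      -- coefficient list exhausted: selection is 0 and getD default false
      simp [pvSel]
    | cons c cs' =>
      cases j with
      | zero =>
        have hr : (pvSel vs cs').testBit k = false :=
          pvSel_bit_none (fun i hi _ =>
            hothers (i + 1) (by simpa using hi) (by simp))
        simp only [List.getD_cons_zero] at hbit
        cases c <;> simp [pvSel, Nat.testBit_xor, hbit, hr]
      | succ j' =>
        have hv : v.testBit k = false := by
          simpa using hothers 0 (by simp) (by simp)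
        have hr := ih (cs := cs') (j := j') (by simpa using hj)
          (by simpa using hbit)
          (fun i hi hne => by
            simpa using hothers (i + 1) (by simpa using hi) (by simpa using hne))
        cases c <;> simp [pvSel, Nat.testBit_xor, hv, hr]

-- encoding of coefficient lists by numbers, for the counting argument
def pvCsOf (len m : Nat) : List Bool := (List.range len).map m.testBit

def pvCsNum : List Bool → Nat
  | [] => 0
  | c :: cs => (cond c 1 0) + 2 * pvCsNum cs

theorem pvCsNum_lt (cs : List Bool) : pvCsNum cs < 2 ^ cs.length := by
  induction cs with
  | nil => simp [pvCsNum]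
  | cons c cs' ih => cases c <;> simp [pvCsNum, pow_succ] <;> omega

theorem pvCsOf_succ (l m : Nat) : pvCsOf (l + 1) m = m.testBit 0 :: pvCsOf l (m / 2) := by
  simp [pvCsOf, List.range_succ_eq_map, List.map_map, Function.comp_def, Nat.testBit_succ]

theorem pvCsOf_num (cs : List Bool) : pvCsOf cs.length (pvCsNum cs) = cs := by
  induction cs with
  | nil => rfl
  | cons c cs' ih =>
    rw [List.length_cons, pvCsOf_succ]
    have h2 : pvCsNum (c :: cs') / 2 = pvCsNum cs' := by cases c <;> simp [pvCsNum] <;> omega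
    have h0 : (pvCsNum (c :: cs')).testBit 0 = c := by
      rw [Nat.testBit_zero]
      cases c <;> simp [pvCsNum] <;> omega
    rw [h2, h0, ih]

theorem pvNotFull {N : Nat} (L : List Nat) (hlen : L.length < N) :
    ∃ x, x < 2 ^ N ∧ ¬ pvMem x L := by
  classical
  set S : Finset Nat :=
    (Finset.range (2 ^ L.length)).image (fun m => pvSel L (pvCsOf L.length m)) with hS
  have hcard : S.card < (Finset.range (2 ^ N)).card := by
    calc S.card ≤ (Finset.range (2 ^ L.length)).card := Finset.card_image_le
    _ = 2 ^ L.length := by simp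
    _ < 2 ^ N := Nat.pow_lt_pow_right (by norm_num) hlen
    _ = (Finset.range (2 ^ N)).card := by simp
  obtain ⟨x, hxT, hxS⟩ := Finset.exists_mem_notMem_of_card_lt_card hcard
  refine ⟨x, by simpa using hxT, ?_⟩
  rintro ⟨cs, hlencs, hsel⟩
  apply hxS
  rw [hS]
  refine Finset.mem_image.mpr ⟨pvCsNum cs, ?_, ?_⟩
  · exact Finset.mem_range.mpr (hlencs ▸ pvCsNum_lt cs)
  · rw [← hlencs, pvCsOf_num, hsel]
-- all-ones minus equals xor (below a power of two)
theorem pvSubMask (N : Nat) : ∀ d : Nat, d < 2 ^ N → 2 ^ N - 1 - d = (2 ^ N - 1) ^^^ d := by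
  induction N with
  | zero => intro d hd; interval_cases d <;> rfl
  | succ n ih =>
    intro d hd
    have hq : d / 2 < 2 ^ n := by omega
    have ihq := ih (d / 2) hq
    apply Nat.eq_of_testBit_eq
    intro i
    cases i with
    | zero =>
      rw [Nat.testBit_xor, Nat.testBit_zero, Nat.testBit_zero, Nat.testBit_zero]
      have h2 : 2 ^ (n + 1) = 2 * 2 ^ n := by ring
      have e1 : (2 ^ (n + 1) - 1) % 2 = 1 := by omega
      rcases Nat.mod_two_eq_zero_or_one d with h | h
      · have e2 : (2 ^ (n + 1) - 1 - d) % 2 = 1 := by omega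
        simp [e1, e2, h]
      · have e2 : (2 ^ (n + 1) - 1 - d) % 2 = 0 := by omega
        simp [e1, e2, h]
    | succ i =>
      have h2 : 2 ^ (n + 1) = 2 * 2 ^ n := by ring
      have h1 : (2 ^ (n + 1) - 1 - d) / 2 = 2 ^ n - 1 - d / 2 := by omega
      have h3 : (2 ^ (n + 1) - 1) / 2 = 2 ^ n - 1 := by omega
      rw [Nat.testBit_xor, Nat.testBit_succ, Nat.testBit_succ, Nat.testBit_succ,
        h1, h3, ihq, Nat.testBit_xor]

-- the n-bit mask as both Int and Nat
theorem pvMaskCast (N : Nat) : ((2 : Int) ^ N - 1) = (((2 ^ N - 1 : Nat) : Int)) := by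
  have : (1 : Nat) ≤ 2 ^ N := Nat.one_le_two_pow
  push_cast [this]
  ring

def pvMk (N : Nat) (x : Int) : Nat := (PySem.Int.band x ((2 : Int) ^ N - 1)).toNat

-- band with the mask, by sign cases
theorem pvMk_nonneg (N : Nat) (x : Int) (hx : 0 ≤ x) :
    pvMk N x = x.toNat % 2 ^ N := by
  unfold pvMk
  rw [pvMaskCast]
  unfold PySem.Int.band
  rw [if_pos hx, if_pos (by positivity)]
  have h1 : (((2 ^ N - 1 : Nat) : Int)).toNat = 2 ^ N - 1 := Int.toNat_natCast _
  rw [h1, Nat.and_two_pow_sub_one_eq_mod]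
  exact Int.toNat_natCast _

theorem pvMk_neg (N : Nat) (x : Int) (hx : ¬ 0 ≤ x) :
    pvMk N x = 2 ^ N - 1 - ((-x - 1).toNat % 2 ^ N) := by
  unfold pvMk
  rw [pvMaskCast]
  unfold PySem.Int.band
  rw [if_neg hx, if_pos (by positivity)]
  have h1 : (((2 ^ N - 1 : Nat) : Int)).toNat = 2 ^ N - 1 := Int.toNat_natCast _
  rw [h1, Nat.and_comm, Nat.and_two_pow_sub_one_eq_mod]
  exact Int.toNat_natCast _

theorem pvMk_lt (N : Nat) (x : Int) : pvMk N x < 2 ^ N := by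
  by_cases hx : 0 ≤ x
  · rw [pvMk_nonneg N x hx]; exact Nat.mod_lt _ (by positivity)
  · rw [pvMk_neg N x hx]; have := Nat.one_le_two_pow (n := N); omega

-- band with the mask is the cast of pvMk (the Int value is nonnegative)
theorem pvMk_cast (N : Nat) (x : Int) :
    PySem.Int.band x ((2 : Int) ^ N - 1) = ((pvMk N x : Nat) : Int) := by
  unfold pvMk
  rw [pvMaskCast]
  unfold PySem.Int.band
  by_cases hx : 0 ≤ x
  · rw [if_pos hx, if_pos (by positivity)]; simp
  · rw [if_neg hx, if_pos (by positivity)]; simp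

-- bits of the masked value, negative case via the xor identity
theorem pvMk_testBit_neg (N : Nat) (x : Int) (hx : ¬ 0 ≤ x) (k : Nat) (hk : k < N) :
    (pvMk N x).testBit k = ! ((-x - 1).toNat.testBit k) := by
  rw [pvMk_neg N x hx, pvSubMask N _ (Nat.mod_lt _ (by positivity)), Nat.testBit_xor,
    Nat.testBit_two_pow_sub_one, Nat.testBit_mod_two_pow]
  simp [hk]

theorem pvMk_testBit_nonneg (N : Nat) (x : Int) (hx : 0 ≤ x) (k : Nat) (hk : k < N) :
    (pvMk N x).testBit k = x.toNat.testBit k := by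
  rw [pvMk_nonneg N x hx, Nat.testBit_mod_two_pow]
  simp [hk]

-- A's pivot test:  x & (1 << k) ≠ 0  ↔  bit k of the masked value
theorem pvBandPow (N : Nat) (x : Int) (k : Nat) (hk : k < N) :
    (PySem.Int.band x ((2 : Int) ^ k) ≠ 0) ↔ (pvMk N x).testBit k = true := by
  have hpow : ((2 : Int) ^ k) = (((2 ^ k : Nat) : Int)) := by push_cast; ring
  by_cases hx : 0 ≤ x
  · rw [pvMk_testBit_nonneg N x hx k hk, hpow]
    unfold PySem.Int.band
    rw [if_pos hx, if_pos (by positivity)]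
    have h0 : (((2 ^ k : Nat) : Int)).toNat = 2 ^ k := Int.toNat_natCast _
    rw [h0, Nat.and_two_pow]
    rcases Bool.eq_false_or_eq_true (x.toNat.testBit k) with h | h
    · have h2 : (2:Nat) ^ k ≠ 0 := (Nat.two_pow_pos k).ne'
      simp [h, h2]
    · simp [h]
  · rw [pvMk_testBit_neg N x hx k hk, hpow]
    unfold PySem.Int.band
    rw [if_neg hx, if_pos (by positivity)]
    have h1 : (((2 ^ k : Nat) : Int)).toNat = 2 ^ k := Int.toNat_natCast _
    rw [h1, Nat.and_comm, Nat.and_two_pow]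
    have hxx : (-x - 1).toNat = (-x).toNat - 1 := by omega
    rw [hxx]
    rcases Bool.eq_false_or_eq_true (((-x).toNat - 1).testBit k) with h | h
    · have h2 : (2:Nat) ^ k ≠ 0 := (Nat.two_pow_pos k).ne'
      simp [h, h2]
    · simp [h]

-- masking distributes over Python xor
theorem pvMk_bxor (N : Nat) (x y : Int) :
    pvMk N (PySem.Int.bxor x y) = pvMk N x ^^^ pvMk N y := by
  apply Nat.eq_of_testBit_eq
  intro k
  by_cases hk : k < N
  · rw [Nat.testBit_xor]
    unfold PySem.Int.bxor
    by_cases hx : 0 ≤ x <;> by_cases hy : 0 ≤ y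
    · rw [if_pos hx, if_pos hy,
        pvMk_testBit_nonneg N _ (by positivity) k hk,
        pvMk_testBit_nonneg N x hx k hk, pvMk_testBit_nonneg N y hy k hk]
      simp [Nat.testBit_xor]
    · rw [if_pos hx, if_neg hy]
      have hneg : ¬ (0 : Int) ≤ -(↑(x.toNat ^^^ (-y - 1).toNat) : Int) - 1 := by
        have : (0:Int) ≤ (↑(x.toNat ^^^ (-y - 1).toNat) : Int) := by positivity
        omega
      rw [pvMk_testBit_neg N _ hneg k hk, pvMk_testBit_nonneg N x hx k hk,
        pvMk_testBit_neg N y hy k hk]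
      have h2 : (-(-(↑(x.toNat ^^^ (-y - 1).toNat) : Int) - 1) - 1).toNat
          = x.toNat ^^^ (-y - 1).toNat := by omega
      rw [h2, Nat.testBit_xor]
      cases x.toNat.testBit k <;> cases (-y - 1).toNat.testBit k <;> rfl
    · rw [if_neg hx, if_pos hy]
      have hneg : ¬ (0 : Int) ≤ -(↑((-x - 1).toNat ^^^ y.toNat) : Int) - 1 := by
        have : (0:Int) ≤ (↑((-x - 1).toNat ^^^ y.toNat) : Int) := by positivity
        omega
      rw [pvMk_testBit_neg N _ hneg k hk, pvMk_testBit_neg N x hx k hk,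
        pvMk_testBit_nonneg N y hy k hk]
      have h2 : (-(-(↑((-x - 1).toNat ^^^ y.toNat) : Int) - 1) - 1).toNat
          = (-x - 1).toNat ^^^ y.toNat := by omega
      rw [h2, Nat.testBit_xor]
      cases (-x - 1).toNat.testBit k <;> cases y.toNat.testBit k <;> rfl
    · rw [if_neg hx, if_neg hy]
      rw [pvMk_testBit_nonneg N _ (by positivity) k hk,
        pvMk_testBit_neg N x hx k hk, pvMk_testBit_neg N y hy k hk]
      have h2 : ((↑((-x - 1).toNat ^^^ (-y - 1).toNat) : Int)).toNat
          = (-x - 1).toNat ^^^ (-y - 1).toNat := by simp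
      rw [h2, Nat.testBit_xor]
      cases (-x - 1).toNat.testBit k <;> cases (-y - 1).toNat.testBit k <;> rfl
  · have h1 := pvMk_lt N (PySem.Int.bxor x y)
    have h2 := pvMk_lt N x
    have h3 := pvMk_lt N y
    have hb : ∀ m : Nat, m < 2 ^ N → m.testBit k = false := by
      intro m hm
      exact Nat.testBit_lt_two_pow (lt_of_lt_of_le hm (Nat.pow_le_pow_right (by norm_num) (by omega)))
    rw [Nat.testBit_xor, hb _ h1, hb _ h2, hb _ h3]
    rfl

-- Python's (u >> k) & 1 test on a nonnegative value
theorem pvTestBit_div (m q : Nat) : m.testBit q = decide (m / 2 ^ q % 2 = 1) := by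
  have h0 : m.testBit q = (m / 2 ^ q).testBit 0 := by
    simpa using (Nat.testBit_div_two_pow (n := q) m 0).symm
  rw [h0, Nat.testBit_zero]

theorem pvShiftTest (u k : Nat) :
    (PySem.Int.band (((u : Int)) >>> k) 1 ≠ 0) ↔ u.testBit k = true := by
  rw [← Int.natCast_shiftRight]
  have h1 : (1 : Int) = ((1 : Nat) : Int) := rfl
  rw [h1, PySem.Int.band_natCast, Nat.and_one_is_mod, Nat.shiftRight_eq_div_pow]
  rw [pvTestBit_div]
  rcases Nat.mod_two_eq_zero_or_one (u / 2 ^ k) with h | h <;> simp [h]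

-- leading bit of a nonzero value below a power of two
theorem pvBitBetween {q m : Nat} (h1 : 2 ^ q ≤ m) (h2 : m < 2 ^ (q + 1)) :
    m.testBit q = true := by
  rw [pvTestBit_div]
  have hpos : 0 < 2 ^ q := Nat.two_pow_pos q
  have hub : m / 2 ^ q < 2 := by
    rw [Nat.div_lt_iff_lt_mul hpos]
    have h4 : (2:Nat) ^ (q + 1) = 2 * 2 ^ q := by ring
    omega
  have hlb : 1 ≤ m / 2 ^ q := (Nat.one_le_div_iff hpos).mpr h1
  have : m / 2 ^ q = 1 := by omega
  simp [this]

theorem pvTestBit_high {q k m : Nat} (h2 : m < 2 ^ (q + 1)) (hk : q < k) :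
    m.testBit k = false :=
  Nat.testBit_lt_two_pow (lt_of_lt_of_le h2 (Nat.pow_le_pow_right (by norm_num) hk))

-- a value whose bits ≥ q are all clear is < 2^q
theorem pvLtOfBitsClear {q m : Nat} (h : ∀ k, q ≤ k → m.testBit k = false) : m < 2 ^ q := by
  by_contra hge
  rw [Nat.not_lt] at hge
  rcases Nat.eq_zero_or_pos m with rfl | hm
  · have := Nat.two_pow_pos q
    omega
  · have hlog : 2 ^ m.log2 ≤ m := Nat.log2_self_le (by omega)
    have hlog2 : m < 2 ^ (m.log2 + 1) := Nat.lt_log2_self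
    have hbit := pvBitBetween hlog hlog2
    have hq : q ≤ m.log2 := by
      by_contra hq
      have : (2:Nat) ^ (m.log2 + 1) ≤ 2 ^ q := Nat.pow_le_pow_right (by norm_num) (by omega)
      omega
    rw [h m.log2 hq] at hbit
    exact Bool.false_ne_true hbit

-- Int shift-left of 1 is the power of two
theorem pvBitLength_lead {u : Nat} (hu : u ≠ 0) :
    PySem.Int.bitLength (u : Int) - 1 = (PySem.Int.bitLength (u : Int) - 1) ∧
    2 ^ (PySem.Int.bitLength (u : Int) - 1) ≤ u ∧ u < 2 ^ (PySem.Int.bitLength (u : Int) - 1 + 1) := by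
  have h1 := PySem.Int.two_pow_bitLength_le (u : Int) (by exact_mod_cast hu)
  have h2 := PySem.Int.lt_two_pow_bitLength (u : Int)
  rw [Int.natAbs_natCast] at h1 h2
  have hbl : PySem.Int.bitLength (u : Int) ≠ 0 := by
    intro h0
    rw [h0] at h2
    simp at h2
    omega
  refine ⟨rfl, h1, ?_⟩
  have : PySem.Int.bitLength (u : Int) - 1 + 1 = PySem.Int.bitLength (u : Int) := by omega
  rw [this]
  exact h2

-- ===== A-side characterization =====
def pvGens (N : Nat) (R : List Int) : List Nat := (R.take N).map (pvMk N)

def pvFull (N : Nat) (M : List Nat) : Prop := ∀ x, x < 2 ^ N → pvMem x M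

theorem pvGens_length {N : Nat} {R : List Int} (h : N ≤ R.length) :
    (pvGens N R).length = N := by
  simp [pvGens]; omega

theorem pvGens_getD {N : Nat} {R : List Int} (h : N ≤ R.length) {j : Nat} (hj : j < N) :
    (pvGens N R).getD j 0 = pvMk N (R.getD j 0) := by
  have hjR : j < R.length := by omega
  have h1 : j < (R.take N).length := by simp; omega
  rw [pvGens, List.getD_eq_getElem?_getD, List.getElem?_map]
  rw [List.getElem?_take_of_lt hj, List.getElem?_eq_getElem hjR]
  simp [List.getD_eq_getElem?_getD, List.getElem?_eq_getElem hjR]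

theorem pvGens_mem {N : Nat} {R : List Int} (h : N ≤ R.length) {v : Nat} :
    v ∈ pvGens N R ↔ ∃ j, j < N ∧ v = pvMk N (R.getD j 0) := by
  constructor
  · intro hv
    obtain ⟨i, hi, hvi⟩ := List.mem_iff_getElem.mp hv
    have hiN : i < N := by
      have := pvGens_length h (R := R); omega
    refine ⟨i, hiN, ?_⟩
    rw [← hvi, ← pvGens_getD h hiN, List.getD_eq_getElem?_getD, List.getElem?_eq_getElem hi]
    rfl
  · rintro ⟨j, hj, rfl⟩
    rw [← pvGens_getD h hj]
    have hlt : j < (pvGens N R).length := by rw [pvGens_length h]; omega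
    rw [List.getD_eq_getElem?_getD, List.getElem?_eq_getElem hlt]
    simpa using List.getElem_mem hlt

theorem pvGens_lt {N : Nat} {R : List Int} {v : Nat} (hv : v ∈ pvGens N R) : v < 2 ^ N := by
  obtain ⟨x, -, rfl⟩ := List.mem_map.mp hv
  exact pvMk_lt N x

theorem pvGetD_map_range {α : Type} (f : Nat → α) {N j : Nat} (hj : j < N) (d : α) :
    ((List.range N).map f).getD j d = f j := by
  rw [List.getD_eq_getElem?_getD, List.getElem?_map, List.getElem?_range hj]
  rfl

def pvInvA (N : Nat) (M : List Nat) (R : List Int) (col : Nat) : Prop :=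
  N ≤ R.length ∧
  (∀ j, j < col → (pvMk N (R.getD j 0)).testBit (N - 1 - j) = true) ∧
  (∀ j, j < col → ∀ r, r < N → r ≠ j → (pvMk N (R.getD r 0)).testBit (N - 1 - j) = false) ∧
  (∀ x, pvMem x (pvGens N R) ↔ pvMem x M)

-- the full-span construction from a fully pivoted state
theorem pvFull_of_pivoted {N : Nat} {M : List Nat} {R : List Int}
    (hinv : pvInvA N M R N) : pvFull N M := by
  obtain ⟨hlen, h1, h2, hspan⟩ := hinv
  intro x hx
  rw [← hspan]
  refine ⟨(List.range N).map (fun j => x.testBit (N - 1 - j)), by simp [pvGens_length hlen], ?_⟩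
  apply Nat.eq_of_testBit_eq
  intro k
  by_cases hk : k < N
  · have hjk : N - 1 - (N - 1 - k) = k := by omega
    have hsel := pvSel_bit_unique (L := pvGens N R)
      (cs := (List.range N).map (fun j => x.testBit (N - 1 - j))) (k := k) (j := N - 1 - k)
      (by rw [pvGens_length hlen]; omega)
      (by rw [pvGens_getD hlen (by omega)]
          have := h1 (N - 1 - k) (by omega)
          rwa [hjk] at this)
      (by intro i hi hne
          rw [pvGens_length hlen] at hi
          rw [pvGens_getD hlen hi]
          have := h2 (N - 1 - k) (by omega) i hi hne
          rwa [hjk] at this)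
    rw [hsel, pvGetD_map_range _ (by omega : N - 1 - k < N), hjk]
  · have hsel_lt : pvSel (pvGens N R) ((List.range N).map (fun j => x.testBit (N - 1 - j))) < 2 ^ N :=
      pvSel_lt (fun v hv => pvGens_lt hv) _
    have hb : ∀ m : Nat, m < 2 ^ N → m.testBit k = false := fun m hm =>
      Nat.testBit_lt_two_pow (lt_of_lt_of_le hm (Nat.pow_le_pow_right (by norm_num) (by omega)))
    rw [hb _ hsel_lt, hb _ hx]

-- no pivot in column col: the span misses 2^(N-1-col)
theorem pvNotFull_of_no_pivot {N : Nat} {M : List Nat} {R : List Int} {col : Nat}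
    (hcol : col < N) (hinv : pvInvA N M R col)
    (hno : ∀ r, col ≤ r → r < N → (pvMk N (R.getD r 0)).testBit (N - 1 - col) = false) :
    ¬ pvFull N M := by
  obtain ⟨hlen, h1, h2, hspan⟩ := hinv
  intro hfull
  have he : (2 : Nat) ^ (N - 1 - col) < 2 ^ N := Nat.pow_lt_pow_right (by norm_num) (by omega)
  obtain ⟨cs, hcslen, hsel⟩ := (hspan _).mpr (hfull _ he)
  have hbit : (pvSel (pvGens N R) cs).testBit (N - 1 - col) = true := by
    rw [hsel]; simp [Nat.testBit_two_pow]
  have hnone : (pvSel (pvGens N R) cs).testBit (N - 1 - col) = false := by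
    apply pvSel_bit_none
    intro i hi hci
    rw [pvGens_length hlen] at hi
    rw [pvGens_getD hlen hi]
    by_cases hic : col ≤ i
    · exact hno i hic hi
    · -- i < col: its coefficient must be false, contradiction with hci
      exfalso
      have huniq := pvSel_bit_unique (L := pvGens N R) (cs := cs) (k := N - 1 - i) (j := i)
        (by rw [pvGens_length hlen]; omega)
        (by rw [pvGens_getD hlen hi]; exact h1 i (by omega))
        (by intro i' hi' hne
            rw [pvGens_length hlen] at hi'
            rw [pvGens_getD hlen hi']
            exact h2 i (by omega) i' hi' hne)
      rw [hsel, Nat.testBit_two_pow] at huniq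
      have hne : ¬ (N - 1 - col = N - 1 - i) := by omega
      rw [decide_eq_false hne] at huniq
      rw [← huniq] at hci
      exact Bool.noConfusion hci
  rw [hbit] at hnone
  exact Bool.noConfusion hnone

-- pointwise description of the elimination fold
theorem pvElimAux (n : Int) (N : Nat) (hnN : n = (N : Int)) (col : Nat) (hcolN : col < N)
    (mask : Int) (R1 : List Int) (hlen : N ≤ R1.length) :
    ∀ (k a : Nat), a + k = N → ∀ S : List Int, S.length = R1.length →
      (∀ j : Nat, a ≤ j → j < S.length → S.getD j 0 = R1.getD j 0) →
      (S.getD col 0 = R1.getD col 0) →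
      ((((PySem.List.pyRange (a : Int) n 1).foldl
          (fun S r =>
            if r != (col : Int) && (PySem.Int.band (PySem.List.pyGetD S r 0) mask != 0) then
              PySem.List.pySetD S r
                (PySem.Int.bxor (PySem.List.pyGetD S r 0) (PySem.List.pyGetD S (col : Int) 0))
            else S) S).length = R1.length) ∧
       ∀ j : Nat, j < S.length →
         ((PySem.List.pyRange (a : Int) n 1).foldl
          (fun S r =>
            if r != (col : Int) && (PySem.Int.band (PySem.List.pyGetD S r 0) mask != 0) then
              PySem.List.pySetD S r
                (PySem.Int.bxor (PySem.List.pyGetD S r 0) (PySem.List.pyGetD S (col : Int) 0))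
            else S) S).getD j 0 =
           (if a ≤ j ∧ j < N ∧ j ≠ col ∧ PySem.Int.band (R1.getD j 0) mask ≠ 0
            then PySem.Int.bxor (R1.getD j 0) (R1.getD col 0) else S.getD j 0)) := by
  intro k
  induction k with
  | zero =>
    intro a ha S hSlen hSag hScol
    have hnil : PySem.List.pyRange (a : Int) n 1 = [] :=
      PySem.List.pyRange_one_eq_nil (by omega)
    rw [hnil]
    refine ⟨hSlen, ?_⟩
    intro j hj
    simp only [List.foldl_nil]
    have : ¬ (a ≤ j ∧ j < N ∧ j ≠ col ∧ PySem.Int.band (R1.getD j 0) mask ≠ 0) := by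
      rintro ⟨h1, h2, -, -⟩; omega
    rw [if_neg this]
  | succ k ih =>
    intro a ha S hSlen hSag hScol
    have hcons : PySem.List.pyRange (a : Int) n 1 = (a : Int) :: PySem.List.pyRange ((a : Int) + 1) n 1 := by
      apply PySem.List.pyRange_one_cons; omega
    have hacast : ((a : Int) + 1) = ((a + 1 : Nat) : Int) := by push_cast; ring
    have haR : a < S.length := by omega
    have hcolR : col < S.length := by omega
    have hSa : PySem.List.pyGetD S (a : Int) 0 = R1.getD a 0 := by
      rw [PySem.List.pyGetD_natCast]; exact hSag a le_rfl haR
    have hScol' : PySem.List.pyGetD S (col : Int) 0 = R1.getD col 0 := by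
      rw [PySem.List.pyGetD_natCast]; exact hScol
    rw [hcons]
    simp only [List.foldl_cons]
    by_cases hac : a = col
    · -- skipped index
      have hguard : (((a : Int) != (col : Int)) &&
          (PySem.Int.band (PySem.List.pyGetD S (a : Int) 0) mask != 0)) = false := by
        subst hac; simp
      rw [hguard]
      simp only [Bool.false_eq_true, if_false]
      obtain ⟨ihlen, ihpt⟩ := ih (a + 1) (by omega) S hSlen
        (fun j hj hj2 => hSag j (by omega) hj2) hScol
      rw [hacast]
      refine ⟨ihlen, ?_⟩
      intro j hj
      rw [ihpt j hj]
      by_cases hcond : a + 1 ≤ j ∧ j < N ∧ j ≠ col ∧ PySem.Int.band (R1.getD j 0) mask ≠ 0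
      · rw [if_pos hcond, if_pos ⟨by omega, hcond.2⟩]
      · rw [if_neg hcond, if_neg ?_]
        rintro ⟨h1, h2, h3, h4⟩
        exact hcond ⟨by omega, h2, h3, h4⟩
    · by_cases hband : PySem.Int.band (R1.getD a 0) mask ≠ 0
      · -- updated index
        have hguard : (((a : Int) != (col : Int)) &&
            (PySem.Int.band (PySem.List.pyGetD S (a : Int) 0) mask != 0)) = true := by
          have hne : ((a : Int) != (col : Int)) = true := by
            simp
            omega
          have h2 : (PySem.Int.band (PySem.List.pyGetD S (a : Int) 0) mask != 0) = true := by
            rw [hSa]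
            simpa using hband
          rw [hne, h2]
          rfl
        rw [hguard]
        simp only [if_true]
        set S' := PySem.List.pySetD S (a : Int)
          (PySem.Int.bxor (PySem.List.pyGetD S (a : Int) 0) (PySem.List.pyGetD S (col : Int) 0)) with hS'
        have hS'len : S'.length = R1.length := by rw [hS', PySem.List.length_pySetD]; exact hSlen
        have hS'pt : ∀ j : Nat, j < S.length → S'.getD j 0 =
            (if j = a then PySem.Int.bxor (R1.getD a 0) (R1.getD col 0) else S.getD j 0) := by
          intro j hj
          rw [← PySem.List.pyGetD_natCast S' j 0, hS',
            PySem.List.pyGetD_pySetD_natCast S a j _ 0 haR, hSa, hScol']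
          by_cases hja : j = a
          · rw [if_pos hja, if_pos hja]
          · rw [if_neg hja, if_neg hja, PySem.List.pyGetD_natCast]
        obtain ⟨ihlen, ihpt⟩ := ih (a + 1) (by omega) S' (by omega)
          (fun j hj hj2 => by
            rw [hS'pt j (by omega), if_neg (by omega)]
            exact hSag j (by omega) (by omega))
          (by rw [hS'pt col hcolR, if_neg (fun h => hac h.symm)]; exact hScol)
        rw [hacast]
        refine ⟨ihlen, ?_⟩
        intro j hj
        rw [ihpt j (by omega)]
        by_cases hja : j = a
        · subst hja
          rw [if_neg (by omega), hS'pt j haR, if_pos rfl, if_pos ⟨le_rfl, by omega, hac, hband⟩]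
        · by_cases hcond : a + 1 ≤ j ∧ j < N ∧ j ≠ col ∧ PySem.Int.band (R1.getD j 0) mask ≠ 0
          · rw [if_pos hcond, if_pos ⟨by omega, hcond.2⟩]
          · rw [if_neg hcond, hS'pt j hj, if_neg hja, if_neg ?_]
            rintro ⟨h1, h2, h3, h4⟩
            exact hcond ⟨by omega, h2, h3, h4⟩
      · -- untouched index
        have hguard : (((a : Int) != (col : Int)) &&
            (PySem.Int.band (PySem.List.pyGetD S (a : Int) 0) mask != 0)) = false := by
          have hband' : PySem.Int.band (R1.getD a 0) mask = 0 := not_not.mp hband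
          have h2 : (PySem.Int.band (PySem.List.pyGetD S (a : Int) 0) mask != 0) = false := by
            rw [hSa]
            simp only [bne_eq_false_iff_eq]
            exact hband'
          rw [h2, Bool.and_false]
        rw [hguard]
        simp only [Bool.false_eq_true, if_false]
        obtain ⟨ihlen, ihpt⟩ := ih (a + 1) (by omega) S hSlen
          (fun j hj hj2 => hSag j (by omega) hj2) hScol
        rw [hacast]
        refine ⟨ihlen, ?_⟩
        intro j hj
        rw [ihpt j hj]
        by_cases hja : j = a
        · subst hja
          rw [if_neg (by omega), if_neg ?_]
          rintro ⟨h1, h2, h3, h4⟩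
          exact hband h4
        · by_cases hcond : a + 1 ≤ j ∧ j < N ∧ j ≠ col ∧ PySem.Int.band (R1.getD j 0) mask ≠ 0
          · rw [if_pos hcond, if_pos ⟨by omega, hcond.2⟩]
          · rw [if_neg hcond, if_neg ?_]
            rintro ⟨h1, h2, h3, h4⟩
            have h1' : a + 1 ≤ j := by omega
            exact hcond ⟨h1', h2, h3, h4⟩

theorem pvALoop (n : Int) (N : Nat) (hnN : n = (N : Int)) (M : List Nat) :
    ∀ (k col : Nat) (R : List Int), col + k = N → pvInvA N M R col →
    (pvAGo n R (PySem.List.pyRange (col : Int) n 1) = true ↔ pvFull N M) := by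
  intro k
  induction k with
  | zero =>
    intro col R hk hinv
    have hcol : col = N := by omega
    subst hcol
    rw [PySem.List.pyRange_one_eq_nil (by omega)]
    simp only [pvAGo]
    exact iff_of_true trivial (pvFull_of_pivoted hinv)
  | succ k ih =>
    intro col R hk hinv
    have hcolN : col < N := by omega
    obtain ⟨hlen, hpart1, hpart2, hspan⟩ := hinv
    rw [PySem.List.pyRange_one_cons (by omega : (col : Int) < n)]
    simp only [pvAGo]
    have ht : (n - 1 - (col : Int)).toNat = N - 1 - col := by omega
    rw [ht]
    have hshift : ((1 <<< (N - 1 - col) : Nat) : Int) = (2:Int) ^ (N - 1 - col) := by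
      push_cast [Nat.shiftLeft_eq]
      ring
    rw [hshift]
    cases hfind : (PySem.List.pyRange (col : Int) n 1).find?
        (fun r => PySem.Int.band (PySem.List.pyGetD R r 0) ((2:Int) ^ (N - 1 - col)) != 0) with
    | none =>
      have hno : ∀ r, col ≤ r → r < N → (pvMk N (R.getD r 0)).testBit (N - 1 - col) = false := by
        intro r hr1 hr2
        have hmem : ((r : Nat) : Int) ∈ PySem.List.pyRange (col : Int) n 1 := by
          rw [PySem.List.mem_pyRange_one]; omega
        have hnp := List.find?_eq_none.mp hfind _ hmem
        rw [PySem.List.pyGetD_natCast] at hnp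
        have hne : ¬ (PySem.Int.band (R.getD r 0) ((2:Int) ^ (N - 1 - col)) ≠ 0) := by
          simpa using hnp
        rcases Bool.eq_false_or_eq_true ((pvMk N (R.getD r 0)).testBit (N - 1 - col)) with h | h
        · exact absurd ((pvBandPow N (R.getD r 0) (N - 1 - col) (by omega)).mpr h) hne
        · exact h
      exact iff_of_false (by simp)
        (pvNotFull_of_no_pivot hcolN ⟨hlen, hpart1, hpart2, hspan⟩ hno)
    | some p =>
      have hpmem := List.mem_of_find?_eq_some hfind
      rw [PySem.List.mem_pyRange_one] at hpmem
      have hppred := List.find?_some hfind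
      set P : Nat := p.toNat with hPdef
      have hpP : p = (P : Int) := by omega
      have hPlt : P < N := by omega
      have hPge : col ≤ P := by omega
      have hPR : P < R.length := by omega
      have hcolR : col < R.length := by omega
      -- the swapped list, pointwise
      set R1 := PySem.List.pySetD (PySem.List.pySetD R (col : Int) (PySem.List.pyGetD R p 0)) p
          (PySem.List.pyGetD R (col : Int) 0) with hR1def
      have hR1len : R1.length = R.length := by
        rw [hR1def, PySem.List.length_pySetD, PySem.List.length_pySetD]
      have hR1pt : ∀ j : Nat, j < R.length → R1.getD j 0 =
          (if j = P then R.getD col 0 else if j = col then R.getD P 0 else R.getD j 0) := by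
        intro j hj
        rw [← PySem.List.pyGetD_natCast R1 j 0, hR1def, hpP,
          PySem.List.pyGetD_pySetD_natCast _ P j _ 0 (by rw [PySem.List.length_pySetD]; omega)]
        by_cases hjP : j = P
        · rw [if_pos hjP, if_pos hjP, PySem.List.pyGetD_natCast]
        · rw [if_neg hjP, if_neg hjP,
            PySem.List.pyGetD_pySetD_natCast _ col j _ 0 hcolR]
          by_cases hjc : j = col
          · rw [if_pos hjc, if_pos hjc, ← hpP]
            rw [hpP, PySem.List.pyGetD_natCast]
          · rw [if_neg hjc, if_neg hjc, PySem.List.pyGetD_natCast]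
      have hR1N : N ≤ R1.length := by omega
      -- the elimination fold, pointwise
      dsimp only
      obtain ⟨hR2len, hR2pt⟩ := pvElimAux n N hnN col hcolN ((2:Int) ^ (N - 1 - col)) R1 hR1N
        N 0 (by omega) R1 rfl (fun j _ _ => rfl) rfl
      rw [Nat.cast_zero] at hR2len hR2pt
      set R2 := (PySem.List.pyRange (0 : Int) n 1).foldl
          (fun S r =>
            if r != (col : Int) && (PySem.Int.band (PySem.List.pyGetD S r 0) ((2:Int) ^ (N - 1 - col)) != 0) then
              PySem.List.pySetD S r
                (PySem.Int.bxor (PySem.List.pyGetD S r 0) (PySem.List.pyGetD S (col : Int) 0))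
            else S) R1 with hR2def
      -- masked views
      have hm1 : ∀ j : Nat, j < N → pvMk N (R1.getD j 0) =
          (if j = P then pvMk N (R.getD col 0) else if j = col then pvMk N (R.getD P 0)
           else pvMk N (R.getD j 0)) := by
        intro j hj
        rw [hR1pt j (by omega)]
        by_cases hjP : j = P
        · rw [if_pos hjP, if_pos hjP]
        · rw [if_neg hjP, if_neg hjP]
          by_cases hjc : j = col
          · rw [if_pos hjc, if_pos hjc]
          · rw [if_neg hjc, if_neg hjc]
      have hR1col : R1.getD col 0 = R.getD P 0 := by
        rw [hR1pt col hcolR]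
        by_cases h : col = P
        · rw [if_pos h, h]
        · rw [if_neg h, if_pos rfl]
      have hPbit : (pvMk N (R.getD P 0)).testBit (N - 1 - col) = true := by
        apply (pvBandPow N (R.getD P 0) (N - 1 - col) (by omega)).mp
        rw [hpP, PySem.List.pyGetD_natCast] at hppred
        simpa using hppred
      have hcolbit : (pvMk N (R1.getD col 0)).testBit (N - 1 - col) = true := by
        rw [hR1col]; exact hPbit
      have hm2 : ∀ j : Nat, j < N → pvMk N (R2.getD j 0) =
          (if j ≠ col ∧ (pvMk N (R1.getD j 0)).testBit (N - 1 - col) = true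
           then pvMk N (R1.getD j 0) ^^^ pvMk N (R1.getD col 0)
           else pvMk N (R1.getD j 0)) := by
        intro j hj
        rw [hR2pt j (by omega)]
        by_cases hcond : j ≠ col ∧ (pvMk N (R1.getD j 0)).testBit (N - 1 - col) = true
        · rw [if_pos ⟨by omega, by omega, hcond.1,
            (pvBandPow N (R1.getD j 0) (N - 1 - col) (by omega)).mpr hcond.2⟩, if_pos hcond]
          exact pvMk_bxor N _ _
        · rw [if_neg hcond, if_neg ?_]
          rintro ⟨-, -, hne, hb⟩
          exact hcond ⟨hne, (pvBandPow N (R1.getD j 0) (N - 1 - col) (by omega)).mp hb⟩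
      have hR2col : pvMk N (R2.getD col 0) = pvMk N (R1.getD col 0) := by
        rw [hm2 col hcolN, if_neg (by simp)]
      -- new invariant
      have hinv2 : pvInvA N M R2 (col + 1) := by
        refine ⟨by omega, ?_, ?_, ?_⟩
        · -- part 1
          intro j hj
          rcases Nat.lt_succ_iff_lt_or_eq.mp hj with hjc | rfl
          · -- old pivot rows keep their bit
            have hbitcol_j : (pvMk N (R1.getD col 0)).testBit (N - 1 - j) = false := by
              rw [hR1col]
              exact hpart2 j hjc P hPlt (by omega)
            have hR1j : pvMk N (R1.getD j 0) = pvMk N (R.getD j 0) := by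
              rw [hm1 j (by omega), if_neg (by omega), if_neg (by omega)]
            rw [hm2 j (by omega)]
            by_cases hcond : j ≠ col ∧ (pvMk N (R1.getD j 0)).testBit (N - 1 - col) = true
            · rw [if_pos hcond, Nat.testBit_xor, hbitcol_j, hR1j, hpart1 j hjc]
              rfl
            · rw [if_neg hcond, hR1j]
              exact hpart1 j hjc
          · -- the new pivot row
            rw [hR2col]
            exact hcolbit
        · -- part 2
          intro j hj r hr hrj
          rcases Nat.lt_succ_iff_lt_or_eq.mp hj with hjc | rfl
          · have hbitcol_j : (pvMk N (R1.getD col 0)).testBit (N - 1 - j) = false := by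
              rw [hR1col]
              exact hpart2 j hjc P hPlt (by omega)
            have hR1r : (pvMk N (R1.getD r 0)).testBit (N - 1 - j) = false := by
              rw [hm1 r hr]
              by_cases hrP : r = P
              · rw [if_pos hrP]
                exact hpart2 j hjc col hcolN (by omega)
              · rw [if_neg hrP]
                by_cases hrc : r = col
                · rw [if_pos hrc]
                  exact hpart2 j hjc P hPlt (by omega)
                · rw [if_neg hrc]
                  exact hpart2 j hjc r hr hrj
            rw [hm2 r hr]
            by_cases hcond : r ≠ col ∧ (pvMk N (R1.getD r 0)).testBit (N - 1 - col) = true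
            · rw [if_pos hcond, Nat.testBit_xor, hbitcol_j, hR1r]
              rfl
            · rw [if_neg hcond]
              exact hR1r
          · -- j = col : bit N-1-col cleared everywhere else
            rw [hm2 r hr]
            by_cases hcond : r ≠ j ∧ (pvMk N (R1.getD r 0)).testBit (N - 1 - j) = true
            · rw [if_pos hcond, Nat.testBit_xor, hcond.2, hcolbit]
              rfl
            · rw [if_neg hcond]
              rcases Bool.eq_false_or_eq_true ((pvMk N (R1.getD r 0)).testBit (N - 1 - j)) with h | h
              · exact absurd ⟨hrj, h⟩ hcond
              · exact h
        · -- span preserved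
          have hmem1 : ∀ j : Nat, j < N → pvMem (pvMk N (R1.getD j 0)) (pvGens N R) := by
            intro j hj
            rw [hm1 j hj]
            by_cases hjP : j = P
            · rw [if_pos hjP]
              exact pvMem_elem ((pvGens_mem hlen).mpr ⟨col, hcolN, rfl⟩)
            · rw [if_neg hjP]
              by_cases hjc : j = col
              · rw [if_pos hjc]
                exact pvMem_elem ((pvGens_mem hlen).mpr ⟨P, hPlt, rfl⟩)
              · rw [if_neg hjc]
                exact pvMem_elem ((pvGens_mem hlen).mpr ⟨j, hj, rfl⟩)
          have hR2N : N ≤ R2.length := by omega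
          have hmem2 : ∀ j : Nat, j < N → pvMem (pvMk N (R1.getD j 0)) (pvGens N R2) := by
            intro j hj
            have helem : pvMem (pvMk N (R2.getD j 0)) (pvGens N R2) :=
              pvMem_elem ((pvGens_mem hR2N).mpr ⟨j, hj, rfl⟩)
            have helemcol : pvMem (pvMk N (R1.getD col 0)) (pvGens N R2) := by
              rw [← hR2col]
              exact pvMem_elem ((pvGens_mem hR2N).mpr ⟨col, hcolN, rfl⟩)
            rw [hm2 j hj] at helem
            by_cases hcond : j ≠ col ∧ (pvMk N (R1.getD j 0)).testBit (N - 1 - col) = true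
            · rw [if_pos hcond] at helem
              have := pvMem_xor helem helemcol
              rwa [Nat.xor_assoc, Nat.xor_self, Nat.xor_zero] at this
            · rwa [if_neg hcond] at helem
          intro x
          rw [← hspan x]
          constructor
          · apply pvMem_mono
            intro v hv
            obtain ⟨j, hj, rfl⟩ := (pvGens_mem hR2N).mp hv
            rw [hm2 j hj]
            by_cases hcond : j ≠ col ∧ (pvMk N (R1.getD j 0)).testBit (N - 1 - col) = true
            · rw [if_pos hcond]
              exact pvMem_xor (hmem1 j hj) (hmem1 col hcolN)
            · rw [if_neg hcond]
              exact hmem1 j hj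
          · apply pvMem_mono
            intro v hv
            obtain ⟨j, hj, rfl⟩ := (pvGens_mem hlen).mp hv
            -- R's row j is one of R1's rows col, P, j
            by_cases hjc : j = col
            · rw [hjc]
              have hcp : pvMk N (R.getD col 0) = pvMk N (R1.getD P 0) := by
                rw [hm1 P hPlt, if_pos rfl]
              rw [hcp]
              exact hmem2 P hPlt
            · by_cases hjP : j = P
              · rw [hjP]
                have hpc : pvMk N (R.getD P 0) = pvMk N (R1.getD col 0) := by rw [hR1col]
                rw [hpc]
                exact hmem2 col hcolN
              · have hjj : pvMk N (R.getD j 0) = pvMk N (R1.getD j 0) := by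
                  rw [hm1 j hj, if_neg hjP, if_neg hjc]
                rw [hjj]
                exact hmem2 j hj
      have hcast : (col : Int) + 1 = ((col + 1 : Nat) : Int) := by push_cast; ring
      rw [hcast]
      exact ih (col + 1) R2 (by omega) hinv2

-- ===== B-side characterization =====
def pvVals (basis : PySem.Dict Int Int) : List Nat := basis.items.map (fun kv => kv.2.toNat)

def pvInvB (N : Nat) (M : List Nat) (basis : PySem.Dict Int Int) (i : Nat) : Prop :=
  (∀ kv ∈ basis.items, ∃ (q u : Nat), kv.1 = (q : Int) ∧ kv.2 = (u : Int) ∧ q < N ∧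
     u.testBit q = true ∧ u < 2 ^ (q + 1)) ∧
  (basis.items.map Prod.fst).Nodup ∧
  basis.items.length = i ∧
  (∀ x, pvMem x (pvVals basis) ↔ pvMem x (M.take i))

theorem pvDict_contains_iff (basis : PySem.Dict Int Int) (k : Int) :
    basis.contains k = true ↔ ∃ v, (k, v) ∈ basis.items := by
  rw [PySem.Dict.contains, List.any_eq_true]
  constructor
  · rintro ⟨p, hp, hpk⟩
    have : p.1 = k := by simpa using hpk
    exact ⟨p.2, by rw [← this]; exact hp⟩
  · rintro ⟨v, hv⟩
    exact ⟨(k, v), hv, by simp⟩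

theorem pvDict_find {k v : Int} {items : List (Int × Int)}
    (hnodup : (items.map Prod.fst).Nodup) (hmem : (k, v) ∈ items) :
    items.find? (fun p => p.1 == k) = some (k, v) := by
  induction items with
  | nil => simp at hmem
  | cons a rest ih =>
    rcases List.mem_cons.mp hmem with rfl | hmem'
    · simp [List.find?_cons_of_pos]
    · have hnd : a.1 ∉ rest.map Prod.fst ∧ (rest.map Prod.fst).Nodup := by
        rw [List.map_cons, List.nodup_cons] at hnodup
        exact hnodup
      have hak : ¬ (a.1 == k) = true := by
        intro hc
        have : a.1 = k := by simpa using hc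
        apply hnd.1
        rw [this]
        exact List.mem_map.mpr ⟨(k, v), hmem', rfl⟩
      rw [List.find?_cons_of_neg (by simpa using hak)]
      exact ih hnd.2 hmem'

theorem pvDict_getD {k v : Int} {basis : PySem.Dict Int Int}
    (hnodup : (basis.items.map Prod.fst).Nodup) (hmem : (k, v) ∈ basis.items) :
    basis.getD k 0 = v := by
  rw [PySem.Dict.getD, PySem.Dict.get?, pvDict_find hnodup hmem]
  rfl

theorem pvVals_mem {basis : PySem.Dict Int Int} {kv : Int × Int} (h : kv ∈ basis.items) :
    kv.2.toNat ∈ pvVals basis :=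
  List.mem_map.mpr ⟨kv, h, rfl⟩

-- the reduction loop of B, characterized
theorem pvRedAux (N : Nat) (basis : PySem.Dict Int Int)
    (hshape : ∀ kv ∈ basis.items, ∃ (q u : Nat), kv.1 = (q : Int) ∧ kv.2 = (u : Int) ∧ q < N ∧
      u.testBit q = true ∧ u < 2 ^ (q + 1))
    (hnodup : (basis.items.map Prod.fst).Nodup) (u0 : Nat) :
    ∀ (k : Nat), k ≤ N → ∀ (u : Nat), u < 2 ^ N →
    pvMem (u ^^^ u0) (pvVals basis) →
    (∀ q : Nat, q < N → k ≤ q → basis.contains (q : Int) = true → u.testBit q = false) →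
    ∃ u' : Nat,
      ((PySem.List.pyRange ((k : Int) - 1) (-1) (-1)).foldl
        (fun (row : Int) p =>
          if basis.contains p && (PySem.Int.band (row >>> p.toNat) 1 != 0) then
            PySem.Int.bxor row (basis.getD p 0) else row) ((u : Nat) : Int)) = ((u' : Nat) : Int) ∧
      u' < 2 ^ N ∧ pvMem (u' ^^^ u0) (pvVals basis) ∧
      (∀ q : Nat, q < N → basis.contains (q : Int) = true → u'.testBit q = false) := by
  intro k
  induction k with
  | zero =>
    intro hkN u hu hmem hbits
    refine ⟨u, ?_, hu, hmem, fun q hq hc => hbits q hq (by omega) hc⟩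
    rw [PySem.List.pyRange_neg_one_eq_nil (by omega)]
    rfl
  | succ k ih =>
    intro hkN u hu hmem hbits
    have hkN' : k < N := by omega
    have hcast : ((k + 1 : Nat) : Int) - 1 = (k : Int) := by push_cast; ring
    rw [hcast, PySem.List.pyRange_neg_one_cons (by omega : (-1 : Int) < (k : Int))]
    rw [List.foldl_cons]
    have htoNat : ((k : Int)).toNat = k := by omega
    by_cases hc : basis.contains (k : Int) = true
    · by_cases hbit : u.testBit k = true
      · -- xor with the stored vector
        have hguard : (basis.contains (k : Int) &&
            (PySem.Int.band (((u : Nat) : Int) >>> ((k : Int)).toNat) 1 != 0)) = true := by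
          rw [htoNat, hc]
          have := (pvShiftTest u k).mpr hbit
          simpa using this
        rw [hguard]
        simp only [if_true]
        obtain ⟨v, hv⟩ := (pvDict_contains_iff basis (k : Int)).mp hc
        obtain ⟨q, uk, hq1, hq2, hqN, hqbit, hqlt⟩ := hshape _ hv
        have hq2' : v = (uk : Int) := by simpa using hq2
        subst hq2'
        have hqk : q = k := by
          have h1 : ((k : Nat) : Int) = ((q : Nat) : Int) := by simpa using hq1
          omega
        subst hqk
        have hgd : basis.getD (q : Int) 0 = (uk : Int) :=
          pvDict_getD hnodup hv
        rw [hgd, PySem.Int.bxor_natCast]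
        have hukN : uk < 2 ^ N := lt_of_lt_of_le hqlt (Nat.pow_le_pow_right (by norm_num) (by omega))
        have hmem' : pvMem ((u ^^^ uk) ^^^ u0) (pvVals basis) := by
          have hukmem : pvMem uk (pvVals basis) := by
            have := pvVals_mem hv
            rw [hq2] at this
            simpa using pvMem_elem this
          have := pvMem_xor hmem hukmem
          have heq : (u ^^^ u0) ^^^ uk = (u ^^^ uk) ^^^ u0 := by
            rw [Nat.xor_assoc, Nat.xor_assoc, Nat.xor_comm u0 uk]
          rwa [heq] at this
        apply ih (by omega) (u ^^^ uk) (Nat.xor_lt_two_pow hu hukN) hmem'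
        intro q' hq' hkq' hc'
        rw [Nat.testBit_xor]
        rcases Nat.eq_or_lt_of_le hkq' with rfl | hgt
        · rw [hbit, hqbit]
          rfl
        · rw [hbits q' hq' (by omega) hc', pvTestBit_high hqlt hgt]
          rfl
      · -- bit not set: skip
        have hguard : (basis.contains (k : Int) &&
            (PySem.Int.band (((u : Nat) : Int) >>> ((k : Int)).toNat) 1 != 0)) = false := by
          rw [htoNat]
          have : ¬ (PySem.Int.band (((u : Nat) : Int) >>> k) 1 ≠ 0) := fun hx =>
            hbit ((pvShiftTest u k).mp hx)
          have h0 : PySem.Int.band (((u : Nat) : Int) >>> k) 1 = 0 := not_not.mp this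
          simp [h0]
        rw [hguard]
        simp only [Bool.false_eq_true, if_false]
        apply ih (by omega) u hu hmem
        intro q' hq' hkq' hc'
        rcases Nat.eq_or_lt_of_le hkq' with rfl | hgt
        · exact Bool.eq_false_iff.mpr hbit
        · exact hbits q' hq' (by omega) hc'
    · -- position not occupied: skip
      have hguard : (basis.contains (k : Int) &&
          (PySem.Int.band (((u : Nat) : Int) >>> ((k : Int)).toNat) 1 != 0)) = false := by
        rw [Bool.eq_false_iff.mpr hc, Bool.false_and]
      rw [hguard]
      simp only [Bool.false_eq_true, if_false]
      apply ih (by omega) u hu hmem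
      intro q' hq' hkq' hc'
      rcases Nat.eq_or_lt_of_le hkq' with rfl | hgt
      · exact absurd hc' hc
      · exact hbits q' hq' (by omega) hc'

-- a basis occupying all N slots spans everything
theorem pvFull_of_basis {N : Nat} {basis : PySem.Dict Int Int}
    (hall : ∀ p, p < N → ∃ u, u ∈ pvVals basis ∧ u.testBit p = true ∧ u < 2 ^ (p + 1)) :
    ∀ x, x < 2 ^ N → pvMem x (pvVals basis) := by
  intro x
  induction x using Nat.strong_induction_on with
  | _ x ihx =>
    intro hx
    rcases Nat.eq_zero_or_pos x with rfl | hxpos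
    · exact pvMem_zero _
    · have hxne : x ≠ 0 := by omega
      set q := x.log2 with hq
      have hq1 : 2 ^ q ≤ x := Nat.log2_self_le hxne
      have hq2 : x < 2 ^ (q + 1) := Nat.lt_log2_self
      have hqN : q < N := by
        by_contra hqN
        have : (2 : Nat) ^ N ≤ 2 ^ q := Nat.pow_le_pow_right (by norm_num) (by omega)
        omega
      obtain ⟨u, hu, hubit, hult⟩ := hall q hqN
      have hxbit : x.testBit q = true := pvBitBetween hq1 hq2
      have hy : x ^^^ u < 2 ^ q := by
        apply pvLtOfBitsClear
        intro j hj
        rcases Nat.eq_or_lt_of_le hj with rfl | hgt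
        · rw [Nat.testBit_xor, hxbit, hubit]
          rfl
        · rw [Nat.testBit_xor, pvTestBit_high hq2 hgt, pvTestBit_high hult hgt]
          rfl
      have hylt : x ^^^ u < x := by omega
      have hyN : x ^^^ u < 2 ^ N :=
        lt_of_lt_of_le hy (Nat.pow_le_pow_right (by norm_num) (by omega))
      have hymem := ihx (x ^^^ u) hylt hyN
      have := pvMem_xor hymem (pvMem_elem hu)
      rwa [Nat.xor_assoc, Nat.xor_self, Nat.xor_zero] at this

-- with N items all slots are occupied (pigeonhole)
theorem pvAllSlots {N : Nat} {basis : PySem.Dict Int Int}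
    (hshape : ∀ kv ∈ basis.items, ∃ (q u : Nat), kv.1 = (q : Int) ∧ kv.2 = (u : Int) ∧ q < N ∧
      u.testBit q = true ∧ u < 2 ^ (q + 1))
    (hnodup : (basis.items.map Prod.fst).Nodup)
    (hcount : basis.items.length = N) :
    ∀ p, p < N → ∃ u, u ∈ pvVals basis ∧ u.testBit p = true ∧ u < 2 ^ (p + 1) := by
  classical
  set K : List Nat := basis.items.map (fun kv => kv.1.toNat) with hK
  have hKnodup : K.Nodup := by
    rw [hK, show (fun kv : Int × Int => kv.1.toNat) = Int.toNat ∘ Prod.fst from rfl,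
      ← List.map_map]
    apply List.Nodup.map_on ?_ hnodup
    intro x hx y hy hxy
    obtain ⟨kvx, hkvx, rfl⟩ := List.mem_map.mp hx
    obtain ⟨kvy, hkvy, rfl⟩ := List.mem_map.mp hy
    obtain ⟨qx, ux, hqx, -, -, -, -⟩ := hshape _ hkvx
    obtain ⟨qy, uy, hqy, -, -, -, -⟩ := hshape _ hkvy
    rw [hqx, hqy] at hxy ⊢
    simp only [Int.toNat_natCast] at hxy
    exact_mod_cast hxy
  have hKlen : K.length = N := by rw [hK, List.length_map, hcount]
  have hKsub : K.toFinset ⊆ Finset.range N := by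
    intro x hx
    rw [List.mem_toFinset] at hx
    obtain ⟨kv, hkv, rfl⟩ := List.mem_map.mp hx
    obtain ⟨q, u, hq, -, hqN, -, -⟩ := hshape _ hkv
    rw [hq, Int.toNat_natCast]
    exact Finset.mem_range.mpr hqN
  have hKcard : K.toFinset.card = N := by
    rw [List.toFinset_card_of_nodup hKnodup, hKlen]
  have hKeq : K.toFinset = Finset.range N :=
    Finset.eq_of_subset_of_card_le hKsub (by rw [hKcard, Finset.card_range])
  intro p hp
  have hpK : p ∈ K := by
    rw [← List.mem_toFinset, hKeq]
    exact Finset.mem_range.mpr hp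
  obtain ⟨kv, hkv, hkvp⟩ := List.mem_map.mp hpK
  obtain ⟨q, u, hq1, hq2, hqN, hqbit, hqlt⟩ := hshape _ hkv
  have hqp : q = p := by rw [hq1, Int.toNat_natCast] at hkvp; exact hkvp
  subst hqp
  refine ⟨u, ?_, hqbit, hqlt⟩
  have := pvVals_mem hkv
  rwa [hq2, Int.toNat_natCast] at this

-- a dependent row kills fullness
theorem pvNotFull_of_dependent {N : Nat} {M : List Nat} {i : Nat}
    (hMlen : M.length = N) (hiN : i < N) (hdep : pvMem (M.getD i 0) (M.take i)) :
    ¬ pvFull N M := by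
  intro hfull
  obtain ⟨x, hx, hnx⟩ := pvNotFull (N := N) (M.take i ++ M.drop (i + 1))
    (by rw [List.length_append, List.length_take, List.length_drop]; omega)
  apply hnx
  have hiM : i < M.length := by omega
  have hdec : M = M.take i ++ M[i] :: M.drop (i + 1) := by
    rw [← List.drop_eq_getElem_cons hiM, List.take_append_drop]
  apply pvMem_mono (L := M) ?_ (hfull x hx)
  intro v hv
  rw [hdec] at hv
  rcases List.mem_append.mp hv with hvl | hvr
  · exact pvMem_elem (List.mem_append.mpr (Or.inl hvl))
  · rcases List.mem_cons.mp hvr with rfl | hvr'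
    · have hgetD : M.getD i 0 = M[i] := by
        rw [List.getD_eq_getElem?_getD, List.getElem?_eq_getElem hiM]
        rfl
      rw [← hgetD]
      exact pvMem_append_left hdep
    · exact pvMem_elem (List.mem_append.mpr (Or.inr hvr'))

theorem pvBLoop (rows : List Int) (n : Int) (N : Nat) (hnN : n = (N : Int))
    (hlen : N ≤ rows.length) :
    ∀ (k i : Nat) (basis : PySem.Dict Int Int), i + k = N →
    pvInvB N (pvGens N rows) basis i →
    (pvBGo rows n basis (PySem.List.pyRange (i : Int) n 1) = true ↔
      pvFull N (pvGens N rows)) := by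
  have hMlen : (pvGens N rows).length = N := pvGens_length hlen
  intro k
  induction k with
  | zero =>
    intro i basis hk hinv
    obtain ⟨hshape, hnodup, hcount, hspan⟩ := hinv
    have hiN : i = N := by omega
    subst hiN
    rw [PySem.List.pyRange_one_eq_nil (by omega)]
    simp only [pvBGo]
    refine iff_of_true trivial ?_
    intro x hx
    have hfull := pvFull_of_basis (pvAllSlots hshape hnodup hcount) x hx
    have := (hspan x).mp hfull
    rwa [List.take_of_length_le (by omega)] at this
  | succ k ih =>
    intro i basis hk hinv
    obtain ⟨hshape, hnodup, hcount, hspan⟩ := hinv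
    have hiN : i < N := by omega
    rw [PySem.List.pyRange_one_cons (by omega : (i : Int) < n)]
    simp only [pvBGo]
    -- the masked row
    have hmask : ((1 <<< n.toNat : Int)) - 1 = (2 : Int) ^ N - 1 := by
      rw [hnN]
      have h1 : ((N : Int)).toNat = N := by omega
      rw [h1]
      push_cast [Nat.shiftLeft_eq]
      ring
    rw [hmask, PySem.List.pyGetD_natCast, pvMk_cast N (rows.getD i 0)]
    set u0 : Nat := pvMk N (rows.getD i 0) with hu0
    -- the reduction loop
    have hstart : n - 1 = ((N : Nat) : Int) - 1 := by omega
    rw [hstart]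
    obtain ⟨u', hfold, hu'N, hu'mem, hu'bits⟩ :=
      pvRedAux N basis hshape hnodup u0 N le_rfl u0 (pvMk_lt N _)
        (by rw [Nat.xor_self]; exact pvMem_zero _)
        (fun q hq hNq _ => absurd hNq (by omega))
    rw [hfold]
    have hMi : (pvGens N rows).getD i 0 = u0 := pvGens_getD hlen hiN
    by_cases hu'0 : u' = 0
    · -- dependent row: B answers false, the span is not full
      subst hu'0
      have hbeq : (((0 : Nat) : Int) == (0 : Int)) = true := by norm_num
      rw [hbeq]
      simp only [if_true]
      refine iff_of_false (by simp) ?_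
      have hu0mem : pvMem u0 (pvVals basis) := by simpa using hu'mem
      have hdep : pvMem ((pvGens N rows).getD i 0) ((pvGens N rows).take i) := by
        rw [hMi]
        exact (hspan u0).mp hu0mem
      exact pvNotFull_of_dependent hMlen hiN hdep
    · -- independent row: insert at its leading bit and recurse
      have hbeq : (((u' : Nat) : Int) == (0 : Int)) = false := by
        simp
        exact_mod_cast hu'0
      rw [hbeq]
      simp only [Bool.false_eq_true, if_false]
      obtain ⟨-, hlead1, hlead2⟩ := pvBitLength_lead hu'0
      have hblpos : 1 ≤ PySem.Int.bitLength ((u' : Nat) : Int) := by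
        by_contra hbl
        have hbl0 : PySem.Int.bitLength ((u' : Nat) : Int) = 0 := by omega
        have h2 := PySem.Int.lt_two_pow_bitLength ((u' : Nat) : Int)
        rw [hbl0] at h2
        simp at h2
        exact hu'0 h2
      set q : Nat := PySem.Int.bitLength ((u' : Nat) : Int) - 1 with hqdef
      have hkey : ((PySem.Int.bitLength ((u' : Nat) : Int) : Nat) : Int) - 1 = ((q : Nat) : Int) := by
        rw [hqdef, Nat.cast_sub hblpos]
        simp
      have hqbit : u'.testBit q = true := pvBitBetween hlead1 hlead2
      have hqN : q < N := by
        by_contra hqN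
        have : (2 : Nat) ^ N ≤ 2 ^ q := Nat.pow_le_pow_right (by norm_num) (by omega)
        omega
      have hnc : ¬ basis.contains ((q : Nat) : Int) = true := by
        intro hc
        rw [hu'bits q hqN hc] at hqbit
        exact Bool.noConfusion hqbit
      rw [hkey]
      set basis' := basis.insert ((q : Nat) : Int) ((u' : Nat) : Int) with hb'
      have hitems' : basis'.items = basis.items ++ [(((q : Nat) : Int), ((u' : Nat) : Int))] := by
        rw [hb', PySem.Dict.items_insert, if_neg hnc]
      have hvals' : pvVals basis' = pvVals basis ++ [u'] := by
        rw [pvVals, hitems', List.map_append]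
        simp [pvVals]
      have htake : (pvGens N rows).take (i + 1) = (pvGens N rows).take i ++ [u0] := by
        rw [List.take_succ]
        have : (pvGens N rows)[i]? = some u0 := by
          rw [List.getElem?_eq_getElem (by omega), ← hMi, List.getD_eq_getElem?_getD,
            List.getElem?_eq_getElem (by omega : i < (pvGens N rows).length)]
          rfl
        rw [this]
        rfl
      have hinv' : pvInvB N (pvGens N rows) basis' (i + 1) := by
        refine ⟨?_, ?_, ?_, ?_⟩
        · intro kv hkv
          rw [hitems'] at hkv
          rcases List.mem_append.mp hkv with h | h
          · exact hshape _ h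
          · rcases List.mem_singleton.mp h with rfl
            exact ⟨q, u', rfl, rfl, hqN, hqbit, hlead2⟩
        · rw [hitems', List.map_append, List.nodup_append]
          refine ⟨hnodup, by
            simp only [List.map_cons, List.map_nil]
            exact List.nodup_singleton _, ?_⟩
          intro a ha b hb
          have hb' : b = ((q : Nat) : Int) := by simpa using hb
          intro hab
          apply hnc
          rw [pvDict_contains_iff]
          obtain ⟨kv, hkv, hkveq⟩ := List.mem_map.mp ha
          exact ⟨kv.2, by rw [← hb', ← hab, ← hkveq]; exact hkv⟩
        · rw [hitems', List.length_append, hcount]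
          simp
        · intro x
          rw [hvals', htake]
          constructor
          · apply pvMem_mono
            intro v hv
            rcases List.mem_append.mp hv with h | h
            · exact pvMem_mono (fun w hw => pvMem_elem (List.mem_append.mpr (Or.inl hw)))
                ((hspan v).mp (pvMem_elem h))
            · rw [List.mem_singleton] at h
              rw [h]
              have h1 : pvMem (u' ^^^ u0) ((pvGens N rows).take i) := (hspan _).mp hu'mem
              have h2 : pvMem (u' ^^^ u0) ((pvGens N rows).take i ++ [u0]) :=
                pvMem_mono (fun w hw => pvMem_elem (List.mem_append.mpr (Or.inl hw))) h1
              have h3 : pvMem u0 ((pvGens N rows).take i ++ [u0]) :=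
                pvMem_elem (List.mem_append.mpr (Or.inr (by simp)))
              have := pvMem_xor h2 h3
              rwa [Nat.xor_assoc, Nat.xor_self, Nat.xor_zero] at this
          · apply pvMem_mono
            intro v hv
            rcases List.mem_append.mp hv with h | h
            · exact pvMem_mono (fun w hw => pvMem_elem (List.mem_append.mpr (Or.inl hw)))
                ((hspan v).mpr (pvMem_elem h))
            · rw [List.mem_singleton] at h
              rw [h]
              have h1 : pvMem (u' ^^^ u0) (pvVals basis ++ [u']) :=
                pvMem_mono (fun w hw => pvMem_elem (List.mem_append.mpr (Or.inl hw))) hu'mem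
              have h2 : pvMem u' (pvVals basis ++ [u']) :=
                pvMem_elem (List.mem_append.mpr (Or.inr (by simp)))
              have := pvMem_xor h2 h1
              rwa [← Nat.xor_assoc, Nat.xor_self, Nat.zero_xor] at this
      have hcast : (i : Int) + 1 = ((i + 1 : Nat) : Int) := by push_cast; ring
      rw [hcast]
      exact ih (i + 1) basis' (by omega) hinv'

theorem pvMain (rows : List Int) (n : Int) (hpre : n ≤ (rows.length : Int)) :
    is_invertible_f2 rows n = is_invertible_f2_alt rows n := by
  by_cases hn : 0 ≤ n
  · set N : Nat := n.toNat with hN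
    have hnN : n = (N : Int) := by omega
    have hlen : N ≤ rows.length := by omega
    have hinvA : pvInvA N (pvGens N rows) rows 0 :=
      ⟨hlen, fun j hj => absurd hj (by omega), fun j hj => absurd hj (by omega),
       fun x => Iff.rfl⟩
    have hinvB : pvInvB N (pvGens N rows) PySem.Dict.empty 0 := by
      refine ⟨?_, ?_, ?_, ?_⟩
      · intro kv hkv
        simp [PySem.Dict.empty] at hkv
      · simp [PySem.Dict.empty]
      · simp [PySem.Dict.empty]
      · intro x
        simp only [List.take_zero]
        exact Iff.rfl
    have hA := pvALoop n N hnN (pvGens N rows) N 0 rows (by omega) hinvA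
    have hB := pvBLoop rows n N hnN hlen N 0 PySem.Dict.empty (by omega) hinvB
    rw [Bool.eq_iff_iff, is_invertible_f2, is_invertible_f2_alt]
    have h0 : ((0 : Nat) : Int) = (0 : Int) := by norm_num
    rw [h0] at hA hB
    exact hA.trans hB.symm
  · rw [is_invertible_f2, is_invertible_f2_alt,
      PySem.List.pyRange_one_eq_nil (by omega : n ≤ 0)]
    rfl

-- ===== VERDICT (by name: the statement is the Claim_ definition above) =====
theorem is_invertible_f2_spec : Claim_equal_is_invertible_f2 := by
  intro rows n hdom hpre
  unfold Spec_is_invertible_f2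
  unfold Pre_is_invertible_f2 at hpre
  exact pvMain rows n hpre
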